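-- pv_equiv track=rewrite | github.com/DCSR6667/need_to_do | recursion_problems/subset_problems/dice.py | dice1
-- ===== SOURCE A (Python) =====
-- def dice1(res,inp):
--     if inp==0:
--         return [res]
--     i=1
--     net=[]
--     while i<=6 and i<=inp:
--         net=net+dice1(res+str(i),inp-i)
--         i+=1
--     return net
-- ===== SOURCE B (Python) =====
-- def comps(n):
--     if n == 0:
--         return ['']
--     return [str(i) + t for i in range(1, min(6, n) + 1) for t in comps(n - i)]
--
-- def dice1(res, inp):
--     return [res + c for c in comps(inp)]
-- ===== Notes on version B (the rewrite author's own statement) =====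
-- stated objective: simpler
-- what changed: Replaces the threaded res-accumulator and while-loop with +-concatenation by a direct recursive helper comps(n) producing compositions via a nested list comprehension, then a single map prefixing res.
import Mathlib
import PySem

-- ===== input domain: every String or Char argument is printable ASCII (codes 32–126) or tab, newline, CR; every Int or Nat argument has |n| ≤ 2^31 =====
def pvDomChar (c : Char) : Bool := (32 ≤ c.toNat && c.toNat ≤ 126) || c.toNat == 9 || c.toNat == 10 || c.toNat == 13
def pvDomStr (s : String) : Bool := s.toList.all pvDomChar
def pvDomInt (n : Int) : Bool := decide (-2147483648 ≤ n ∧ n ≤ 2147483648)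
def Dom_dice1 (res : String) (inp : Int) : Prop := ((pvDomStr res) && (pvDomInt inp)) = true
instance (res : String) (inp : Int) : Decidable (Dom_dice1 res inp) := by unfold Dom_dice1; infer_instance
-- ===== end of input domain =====

-- B replaces A's threaded `res` accumulator and while-loop with a direct recursive
-- compositions helper plus one final prefixing map (objective: simpler).

-- ===== PORT A =====
-- A's `while i<=6 and i<=inp` counting loop, threading the accumulator `net`,
-- is the fold of its body over i = 1 .. min 6 inp (attach carries the range
-- membership needed for termination).
def dice1 (res : String) (inp : Int) : List String :=
  if inp == 0 then [res]
  else
    (PySem.List.pyRange 1 (min 6 inp + 1) 1).attach.foldl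
      (fun net i => net ++ dice1 (res ++ PySem.Int.toStr i.1) (inp - i.1)) []
termination_by inp.toNat
decreasing_by
  have h := PySem.List.mem_pyRange_one.mp i.2
  omega

-- ===== PORT B =====
-- comps(n): compositions of n into parts 1..6, by nested list comprehension.
def comps (n : Int) : List String :=
  if n == 0 then [""]
  else
    (PySem.List.pyRange 1 (min 6 n + 1) 1).attach.flatMap
      (fun i => (comps (n - i.1)).map (fun t => PySem.Int.toStr i.1 ++ t))
termination_by n.toNat
decreasing_by
  have h := PySem.List.mem_pyRange_one.mp i.2
  omega

def dice1_alt (res : String) (inp : Int) : List String :=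
  (comps inp).map (fun c => res ++ c)

-- ===== PRECONDITION & SPEC =====
-- A's recursion depth equals inp (it always descends by 1 first), so for large
-- positive inp Python A raises RecursionError; Pre_ excludes those inputs
-- (B raises there too, for the same reason).
def Pre_dice1 (res : String) (inp : Int) : Prop := inp ≤ 900
instance (res : String) (inp : Int) : Decidable (Pre_dice1 res inp) := by unfold Pre_dice1; infer_instance
def pvWitness_dice1 : String × Int := ("a", 4)

def Spec_dice1 (res : String) (inp : Int) (out : List String) : Prop := out = dice1_alt res inp
instance (res : String) (inp : Int) (out : List String) : Decidable (Spec_dice1 res inp out) := by unfold Spec_dice1; infer_instance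

-- ===== CLAIM (what is proved, stated in full; the proofs are below) =====
def Claim_equal_dice1 : Prop := ∀ (res : String) (inp : Int), Dom_dice1 res inp → Pre_dice1 res inp → Spec_dice1 res inp (dice1 res inp)

-- ===== LEMMAS AND PROOFS =====
theorem dice1_eq_comps (res : String) (inp : Int) :
    dice1 res inp = (comps inp).map (fun c => res ++ c) := by
  rw [dice1, comps]
  by_cases h : inp == 0
  · simp [h]
  · simp only [h, Bool.false_eq_true, if_false,
      PySem.List.foldl_append_eq_flatMap, List.nil_append, List.map_flatMap]
    congr 1
    funext i
    rw [dice1_eq_comps (res ++ PySem.Int.toStr i.1) (inp - i.1), List.map_map]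
    congr 1
    funext t
    simp [String.append_assoc]
termination_by inp.toNat
decreasing_by
  have := PySem.List.mem_pyRange_one.mp i.2
  omega

-- ===== VERDICT (by name: the statement is the Claim_ definition above) =====
theorem dice1_spec : Claim_equal_dice1 := by
  intro res inp _ _
  unfold Spec_dice1 dice1_alt
  exact dice1_eq_comps res inp
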